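-- pv_equiv track=rewrite | github.com/manangupta2713/TestDashboard-FileRenaming | Code/Upcoming/replace_word_inside_file-contents_and_filenames.py | apply_case_pattern
-- ===== SOURCE A (Python) =====
-- def apply_case_pattern(sample: str, base: str) -> str:
--     """Return base transformed to mimic the per-character case pattern of sample.
--
--     Rules:
--     - For i < len(sample): if sample[i] is upper -> base[i].upper(); if lower -> base[i].lower(); else keep base[i].
--     - For i >= len(sample): repeat last known case pattern; default to lower if unknown.
--     - If base shorter than sample, we still map per available chars.
--     """
--     out_chars = []
--     last_is_upper = None
--
--     for i, ch in enumerate(base):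
--         if i < len(sample):
--             s = sample[i]
--             if s.isalpha():
--                 out_chars.append(ch.upper() if s.isupper() else ch.lower())
--                 last_is_upper = s.isupper()
--             else:
--                 out_chars.append(ch)
--             continue
--         # Beyond the sample length: extend using the last observed case preference
--         if last_is_upper is True:
--             out_chars.append(ch.upper())
--         elif last_is_upper is False:
--             out_chars.append(ch.lower())
--         else:
--             out_chars.append(ch)  # no guidance; keep as-is
--     return "".join(out_chars)
-- ===== SOURCE B (Python) =====
-- def apply_case_pattern(sample: str, base: str) -> str:
--     """Two-pass version: map the overlapping prefix via zip, then apply one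
--     precomputed default case to the whole remaining suffix."""
--     prefix = [
--         (b.upper() if s.isupper() else b.lower()) if s.isalpha() else b
--         for s, b in zip(sample, base)
--     ]
--     default = None
--     for s in reversed(sample):
--         if s.isalpha():
--             default = s.isupper()
--             break
--     tail = base[len(sample):]
--     if default is True:
--         suffix = tail.upper()
--     elif default is False:
--         suffix = tail.lower()
--     else:
--         suffix = tail
--     return "".join(prefix) + suffix
-- ===== Notes on version B (the rewrite author's own statement) =====
-- stated objective: simpler
-- what changed: Replaces A's single loop with a last_is_upper state variable by two stateless passes: a zip-map over the overlapping prefix, plus one default case (last alphabetic char of sample, found by a backward scan) applied uniformly to the whole suffix.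
import Mathlib
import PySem

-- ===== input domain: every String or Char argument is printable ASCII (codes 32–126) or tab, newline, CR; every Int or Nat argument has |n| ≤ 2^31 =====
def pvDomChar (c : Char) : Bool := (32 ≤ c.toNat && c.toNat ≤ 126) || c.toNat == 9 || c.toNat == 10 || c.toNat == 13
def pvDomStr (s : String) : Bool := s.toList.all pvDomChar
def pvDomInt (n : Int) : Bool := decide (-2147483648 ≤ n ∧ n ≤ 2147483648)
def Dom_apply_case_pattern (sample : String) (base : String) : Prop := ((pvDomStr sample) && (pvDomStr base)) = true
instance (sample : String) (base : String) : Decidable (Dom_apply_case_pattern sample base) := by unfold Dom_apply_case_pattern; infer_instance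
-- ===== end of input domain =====

-- B replaces A's single stateful loop by two passes (zip-map the prefix, one precomputed
-- default case for the whole suffix); objective: simpler, same O(n) cost.

-- ===== PORT A =====
-- A's loop over enumerate(base): each step consumes one char of base and (while available)
-- the matching char of sample, carrying the last_is_upper state (Option Bool).
def pvALoop (sample : List Char) (base : List Char) (last : Option Bool) : List Char :=
  match sample, base with
  | _, [] => []
  | s :: srest, ch :: brest =>
    if PySem.Chars.isalpha s then
      (if PySem.Chars.isupper s then PySem.Chars.upperChar ch else PySem.Chars.lowerChar ch)
        :: pvALoop srest brest (some (PySem.Chars.isupper s))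
    else
      ch :: pvALoop srest brest last
  | [], ch :: brest =>
    match last with
    | some true => PySem.Chars.upperChar ch :: pvALoop [] brest last
    | some false => PySem.Chars.lowerChar ch :: pvALoop [] brest last
    | none => ch :: pvALoop [] brest last

def apply_case_pattern (sample : String) (base : String) : String :=
  String.mk (pvALoop sample.toList base.toList none)

-- ===== PORT B =====
-- pass 1: prefix via zip; default: last alphabetic char of sample; pass 2: suffix by default
def pvBPrefix (sample : List Char) (base : List Char) : List Char :=
  (List.zip sample base).map (fun p =>
    if PySem.Chars.isalpha p.1 then
      (if PySem.Chars.isupper p.1 then PySem.Chars.upperChar p.2 else PySem.Chars.lowerChar p.2)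
    else p.2)

def pvBDefault (sample : List Char) : Option Bool :=
  match sample.reverse.find? PySem.Chars.isalpha with
  | some c => some (PySem.Chars.isupper c)
  | none => none

def pvBSuffix (d : Option Bool) (tail : List Char) : List Char :=
  match d with
  | some true => tail.map PySem.Chars.upperChar
  | some false => tail.map PySem.Chars.lowerChar
  | none => tail

def apply_case_pattern_alt (sample : String) (base : String) : String :=
  String.mk (pvBPrefix sample.toList base.toList
    ++ pvBSuffix (pvBDefault sample.toList) (base.toList.drop sample.toList.length))

-- ===== PRECONDITION & SPEC =====
def Spec_apply_case_pattern (sample : String) (base : String) (out : String) : Prop := out = apply_case_pattern_alt sample base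
instance (sample : String) (base : String) (out : String) : Decidable (Spec_apply_case_pattern sample base out) := by unfold Spec_apply_case_pattern; infer_instance

-- ===== CLAIM (what is proved, stated in full; the proofs are below) =====
def Claim_equal_apply_case_pattern : Prop := ∀ (sample : String) (base : String), Dom_apply_case_pattern sample base → Spec_apply_case_pattern sample base (apply_case_pattern sample base)

-- ===== LEMMAS AND PROOFS =====

-- generalized default: B's reverse-scan, falling back to the loop state
def pvDefaultOf (sample : List Char) (last : Option Bool) : Option Bool :=
  match sample.reverse.find? PySem.Chars.isalpha with
  | some c => some (PySem.Chars.isupper c)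
  | none => last

lemma pvALoop_nil (base : List Char) (last : Option Bool) :
    pvALoop [] base last = pvBSuffix last base := by
  induction base with
  | nil => cases last with
    | none => rfl
    | some b => cases b <;> rfl
  | cons ch rest ih =>
    cases last with
    | none => simp [pvALoop, pvBSuffix, ih]
    | some b => cases b <;> simp [pvALoop, pvBSuffix, ih]

lemma pvDefaultOf_cons (s : Char) (srest : List Char) (last : Option Bool) :
    pvDefaultOf (s :: srest) last =
      pvDefaultOf srest (if PySem.Chars.isalpha s then some (PySem.Chars.isupper s) else last) := by
  unfold pvDefaultOf
  rw [List.reverse_cons, List.find?_append]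
  cases h : srest.reverse.find? PySem.Chars.isalpha with
  | some c => simp
  | none => by_cases ha : PySem.Chars.isalpha s <;> simp [ha, List.find?]

lemma pvALoop_eq (sample base : List Char) (last : Option Bool) :
    pvALoop sample base last =
      pvBPrefix sample base ++ pvBSuffix (pvDefaultOf sample last) (base.drop sample.length) := by
  induction sample generalizing base last with
  | nil =>
    simp [pvBPrefix, pvDefaultOf, pvALoop_nil]
  | cons s srest ih =>
    cases base with
    | nil => cases srest <;> simp [pvALoop, pvBPrefix, pvBSuffix] <;> split <;> rfl
    | cons ch brest =>
      rw [pvDefaultOf_cons]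
      by_cases ha : PySem.Chars.isalpha s
      · simp [pvALoop, pvBPrefix, ha, ih]
      · simp [pvALoop, pvBPrefix, ha, ih]

lemma pvBDefault_eq (sample : List Char) : pvBDefault sample = pvDefaultOf sample none := by
  unfold pvBDefault pvDefaultOf
  cases sample.reverse.find? PySem.Chars.isalpha <;> rfl

-- ===== VERDICT (by name: the statement is the Claim_ definition above) =====
theorem apply_case_pattern_spec : Claim_equal_apply_case_pattern := by
  intro sample base _
  unfold Spec_apply_case_pattern apply_case_pattern apply_case_pattern_alt
  rw [pvALoop_eq, pvBDefault_eq]
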